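-- pv_equiv track=rewrite | github.com/chrishanel/adventofcode | solutions/2024/day_05/solution.py | rulecheck
-- ===== SOURCE A (Python) =====
-- def rulecheck(rules, pages):
--     for idx, page in reversed(list(enumerate(pages))):
--         try:
--             rule = rules[str(page)]
--             for x in range(idx):
--                 if pages[x] in rule:
--                         return 0
--         except:
--             continue
--
--     middle = int((len(pages)-1)/2)
--     return pages[middle]
-- ===== SOURCE B (Python) =====
-- def rulecheck(rules, pages):
--     seen = set()
--     for page in pages:
--         rule = rules.get(str(page))
--         if rule is not None and seen.intersection(rule):
--             return 0
--         seen.add(page)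
--     return pages[int((len(pages) - 1) / 2)]
-- ===== Notes on version B (the rewrite author's own statement) =====
-- stated objective: simpler
-- what changed: Replaces A's reversed nested scan (for each page, re-scan all earlier pages) with a single forward pass maintaining a 'seen' set and one set intersection per page.
-- outside the precondition, e.g. on rulecheck({}, []): A raises IndexError, B raises IndexError
import Mathlib
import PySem

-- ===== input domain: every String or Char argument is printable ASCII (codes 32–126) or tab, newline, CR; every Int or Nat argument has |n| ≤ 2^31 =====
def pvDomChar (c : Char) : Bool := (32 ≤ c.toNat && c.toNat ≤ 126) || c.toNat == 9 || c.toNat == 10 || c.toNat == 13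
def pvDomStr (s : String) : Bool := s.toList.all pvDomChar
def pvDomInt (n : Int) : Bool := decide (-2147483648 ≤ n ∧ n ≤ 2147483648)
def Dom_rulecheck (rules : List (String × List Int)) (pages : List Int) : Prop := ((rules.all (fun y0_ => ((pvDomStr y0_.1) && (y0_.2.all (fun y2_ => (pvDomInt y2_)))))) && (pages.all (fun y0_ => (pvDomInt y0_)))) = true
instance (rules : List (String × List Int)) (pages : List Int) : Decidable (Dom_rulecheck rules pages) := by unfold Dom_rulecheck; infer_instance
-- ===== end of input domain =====

-- B replaces A's reversed nested scan of earlier pages by one forward pass with a 'seen' set (objective: simpler).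

-- ===== PORT A =====
-- inner loop 'for x in range(idx): if pages[x] in rule: return 0'
-- (pages[x] with 0 ≤ x < idx < len(pages) is always in range, so pyGetD is exact there)
def pvInner (pages : List Int) (idx : Int) (rule : List Int) : Bool :=
  (PySem.List.pyRange 0 idx 1).any (fun x => decide (PySem.List.pyGetD pages x 0 ∈ rule))

-- outer loop over reversed(list(enumerate(pages))); 'except: continue' only ever catches the dict KeyError
def rulecheckGo (rules : List (String × List Int)) (pages : List Int) : List (Int × Int) → Option Int
  | [] => none
  | (idx, page) :: rest =>
    match (PySem.Dict.mk rules).get? (PySem.Int.toStr page) with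
    | none => rulecheckGo rules pages rest
    | some rule =>
      if pvInner pages idx rule then some 0
      else rulecheckGo rules pages rest

def rulecheck (rules : List (String × List Int)) (pages : List Int) : Int :=
  match rulecheckGo rules pages (PySem.List.enumerate pages 0).reverse with
  | some v => v
  -- middle = int((len(pages)-1)/2); exact for pages ≠ [] (Pre_); pages[middle] then in range
  | none => PySem.List.pyGetD pages (((pages.length : Int) - 1) / 2) 0

-- ===== PORT B =====
def rulecheckAltGo (rules : List (String × List Int)) : List Int → PySem.Set Int → Option Int
  | [], _ => none
  | page :: rest, seen =>
    match (PySem.Dict.mk rules).get? (PySem.Int.toStr page) with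
    | some rule =>
      if !(PySem.Set.inter seen rule).isEmpty then some 0
      else rulecheckAltGo rules rest (PySem.Set.add seen page)
    | none => rulecheckAltGo rules rest (PySem.Set.add seen page)

def rulecheck_alt (rules : List (String × List Int)) (pages : List Int) : Int :=
  match rulecheckAltGo rules pages PySem.Set.empty with
  | some v => v
  | none => PySem.List.pyGetD pages (((pages.length : Int) - 1) / 2) 0

-- ===== PRECONDITION & SPEC =====
-- Pre_ excludes only pages = [], on which both A and B raise IndexError (pages[0] of an empty list).
def Pre_rulecheck (rules : List (String × List Int)) (pages : List Int) : Prop := pages ≠ []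
instance (rules : List (String × List Int)) (pages : List Int) : Decidable (Pre_rulecheck rules pages) := by unfold Pre_rulecheck; infer_instance

def pvWitness_rulecheck : (List (String × List Int)) × List Int := ([("1", [2])], [1, 2])

def Spec_rulecheck (rules : List (String × List Int)) (pages : List Int) (out : Int) : Prop := out = rulecheck_alt rules pages
instance (rules : List (String × List Int)) (pages : List Int) (out : Int) : Decidable (Spec_rulecheck rules pages out) := by unfold Spec_rulecheck; infer_instance

-- ===== CLAIM (what is proved, stated in full; the proofs are below) =====
def Claim_equal_rulecheck : Prop := ∀ (rules : List (String × List Int)) (pages : List Int), Dom_rulecheck rules pages → Pre_rulecheck rules pages → Spec_rulecheck rules pages (rulecheck rules pages)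

-- ===== LEMMAS AND PROOFS =====

theorem pvMemInter (s : PySem.Set Int) (t : List Int) (v : Int) :
    v ∈ PySem.Set.inter s t ↔ v ∈ s ∧ v ∈ t := by
  simp [PySem.Set.inter]

-- "some earlier page of pages[j] is forbidden by pages[j]'s rule"
def pvBad (rules : List (String × List Int)) (pages : List Int) : Prop :=
  ∃ j, ∃ _ : j < pages.length, ∃ rule,
    (PySem.Dict.mk rules).get? (PySem.Int.toStr pages[j]) = some rule ∧
    ∃ i, ∃ _ : i < j, pages[i] ∈ rule

def pvCondA (rules : List (String × List Int)) (pages : List Int) (q : Int × Int) : Bool :=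
  match (PySem.Dict.mk rules).get? (PySem.Int.toStr q.2) with
  | none => false
  | some rule => pvInner pages q.1 rule

theorem rulecheckGo_char (rules : List (String × List Int)) (pages : List Int) (L : List (Int × Int)) :
    rulecheckGo rules pages L = (if L.any (pvCondA rules pages) then some 0 else none) := by
  induction L with
  | nil => simp [rulecheckGo]
  | cons q rest ih =>
    obtain ⟨idx, page⟩ := q
    cases h : (PySem.Dict.mk rules).get? (PySem.Int.toStr page) with
    | none =>
      have hc : pvCondA rules pages (idx, page) = false := by
        simp only [pvCondA]; rw [h]
      simp only [rulecheckGo]; rw [h, List.any_cons, hc]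
      simpa using ih
    | some rule =>
      have hc : pvCondA rules pages (idx, page) = pvInner pages idx rule := by
        simp only [pvCondA]; rw [h]
      simp only [rulecheckGo]; rw [h, List.any_cons, hc]
      by_cases hin : pvInner pages idx rule = true
      · simp [hin]
      · simp only [Bool.not_eq_true] at hin
        rw [ih]; simp only [hin, Bool.false_or]; simp

theorem anyA_iff (rules : List (String × List Int)) (pages : List Int) :
    (PySem.List.enumerate pages 0).any (pvCondA rules pages) = true ↔ pvBad rules pages := by
  rw [List.any_eq_true]
  constructor
  · rintro ⟨q, hq, hcond⟩
    rw [PySem.List.mem_enumerate_iff] at hq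
    obtain ⟨k, hk, rfl⟩ := hq
    simp only [pvCondA, zero_add] at hcond
    cases hget : (PySem.Dict.mk rules).get? (PySem.Int.toStr pages[k]) with
    | none => rw [hget] at hcond; simp at hcond
    | some rule =>
      rw [hget] at hcond
      change pvInner pages (k:Int) rule = true at hcond
      simp only [pvInner] at hcond
      rw [List.any_eq_true] at hcond
      obtain ⟨x, hxmem, hx⟩ := hcond
      rw [PySem.List.mem_pyRange_one] at hxmem
      have hx0 : 0 ≤ x := hxmem.1
      have hxk : x < (k : Int) := hxmem.2
      have hxl : x.toNat < k := by omega
      have hget2 : PySem.List.pyGetD pages x 0 = pages[x.toNat] :=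
        PySem.List.pyGetD_eq_getElem pages 0 hx0 (by omega)
      rw [hget2] at hx
      exact ⟨k, hk, rule, hget, x.toNat, hxl, by simpa using hx⟩
  · rintro ⟨j, hj, rule, hget, i, hij, hmem⟩
    refine ⟨((j : Int), pages[j]), ?_, ?_⟩
    · rw [PySem.List.mem_enumerate_iff]; exact ⟨j, hj, by simp⟩
    · simp only [pvCondA, hget, pvInner]
      rw [List.any_eq_true]
      refine ⟨(i : Int), ?_, ?_⟩
      · rw [PySem.List.mem_pyRange_one]; omega
      · have : PySem.List.pyGetD pages (i : Int) 0 = pages[i] := by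
          simpa using PySem.List.pyGetD_eq_getElem pages 0 (by omega : (0:Int) ≤ (i:Int)) (by omega)
        simp [this, hmem]

theorem altGo_shape (rules : List (String × List Int)) (l : List Int) (seen : PySem.Set Int) :
    rulecheckAltGo rules l seen = none ∨ rulecheckAltGo rules l seen = some 0 := by
  induction l generalizing seen with
  | nil => left; rfl
  | cons p rest ih =>
    simp only [rulecheckAltGo]
    cases (PySem.Dict.mk rules).get? (PySem.Int.toStr p) with
    | none => exact ih _
    | some rule =>
      by_cases h : (!(PySem.Set.inter seen rule).isEmpty) = true
      · right; simp [h]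
      · simp only [h, if_false]; exact ih _

theorem altGo_none_iff (rules : List (String × List Int)) (l : List Int) (seen : PySem.Set Int) :
    rulecheckAltGo rules l seen = none ↔
      ∀ j, ∀ _ : j < l.length, ∀ rule,
        (PySem.Dict.mk rules).get? (PySem.Int.toStr l[j]) = some rule →
        (∀ v ∈ seen, v ∉ rule) ∧ ∀ i, ∀ _ : i < j, l[i] ∉ rule := by
  induction l generalizing seen with
  | nil => simp [rulecheckAltGo]
  | cons p rest ih =>
    simp only [rulecheckAltGo]
    cases hget : (PySem.Dict.mk rules).get? (PySem.Int.toStr p) with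
    | none =>
      rw [ih]
      constructor
      · rintro h j hj rule hr
        cases j with
        | zero => simp only [List.getElem_cons_zero] at hr; rw [hget] at hr; exact absurd hr (by simp)
        | succ k =>
          have hk : k < rest.length := by simpa using hj
          obtain ⟨h1, h2⟩ := h k hk rule (by simpa using hr)
          refine ⟨fun v hv => h1 v (by simp [PySem.Set.mem_add, hv]), ?_⟩
          rintro i hi
          cases i with
          | zero =>
            have := h1 p (by simp [PySem.Set.mem_add])
            simpa using this
          | succ i' => have : i' < k := by omega
                       simpa using h2 i' this
      · rintro h k hk rule hr
        obtain ⟨h1, h2⟩ := h (k+1) (by simpa using hk) rule (by simpa using hr)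
        constructor
        · intro v hv
          rw [PySem.Set.mem_add] at hv
          rcases hv with hv | hv
          · exact h1 v hv
          · subst hv; simpa using h2 0 (by omega)
        · intro i hi; simpa using h2 (i+1) (by omega)
    | some rule0 =>
      by_cases hemp : (PySem.Set.inter seen rule0).isEmpty = true
      · simp only [hemp, Bool.not_true, if_false, Bool.false_eq_true]
        rw [ih]
        constructor
        · rintro h j hj rule hr
          cases j with
          | zero =>
            simp only [List.getElem_cons_zero] at hr; rw [hget] at hr
            injection hr with hr
            refine ⟨?_, fun i hi => absurd hi (by omega)⟩
            intro v hv hvr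
            have hmem : v ∈ PySem.Set.inter seen rule0 := (pvMemInter seen rule0 v).mpr ⟨hv, hr ▸ hvr⟩
            rw [List.isEmpty_iff] at hemp
            simp [hemp] at hmem
          | succ k =>
            have hk : k < rest.length := by simpa using hj
            obtain ⟨h1, h2⟩ := h k hk rule (by simpa using hr)
            refine ⟨fun v hv => h1 v (by simp [PySem.Set.mem_add, hv]), ?_⟩
            rintro i hi
            cases i with
            | zero => simpa using h1 p (by simp [PySem.Set.mem_add])
            | succ i' => have : i' < k := by omega
                         simpa using h2 i' this
        · rintro h k hk rule hr
          obtain ⟨h1, h2⟩ := h (k+1) (by simpa using hk) rule (by simpa using hr)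
          constructor
          · intro v hv
            rw [PySem.Set.mem_add] at hv
            rcases hv with hv | hv
            · exact h1 v hv
            · subst hv; simpa using h2 0 (by omega)
          · intro i hi; simpa using h2 (i+1) (by omega)
      · simp only [hemp, Bool.not_false, if_true]
        constructor
        · intro h; exact absurd h (by simp)
        · intro h
          obtain ⟨h1, _⟩ := h 0 (by simp) rule0 (by simpa using hget)
          have hne : PySem.Set.inter seen rule0 ≠ [] := by
            intro hh; rw [hh] at hemp; simp at hemp
          obtain ⟨v, hv⟩ := List.exists_mem_of_ne_nil _ hne
          rw [pvMemInter] at hv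
          exact absurd hv.2 (h1 v hv.1)

theorem alt_none_iff_not_bad (rules : List (String × List Int)) (pages : List Int) :
    rulecheckAltGo rules pages PySem.Set.empty = none ↔ ¬ pvBad rules pages := by
  rw [altGo_none_iff]
  constructor
  · rintro h ⟨j, hj, rule, hget, i, hij, hmem⟩
    obtain ⟨_, h2⟩ := h j hj rule hget
    exact h2 i hij hmem
  · intro h j hj rule hget
    refine ⟨by simp [PySem.Set.empty], ?_⟩
    intro i hij hmem
    exact h ⟨j, hj, rule, hget, i, hij, hmem⟩

-- ===== VERDICT (by name: the statement is the Claim_ definition above) =====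
theorem rulecheck_spec : Claim_equal_rulecheck := by
  intro rules pages _ _
  unfold Spec_rulecheck rulecheck rulecheck_alt
  rw [rulecheckGo_char]
  rw [List.any_reverse]
  by_cases hb : pvBad rules pages
  · have hA : (PySem.List.enumerate pages 0).any (pvCondA rules pages) = true := (anyA_iff rules pages).mpr hb
    have hB : rulecheckAltGo rules pages PySem.Set.empty = some 0 := by
      rcases altGo_shape rules pages PySem.Set.empty with h | h
      · exact absurd ((alt_none_iff_not_bad rules pages).mp h) (by simpa using hb)
      · exact h
    have hB' : rulecheckAltGo rules pages ([] : PySem.Set Int) = some 0 := hB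
    simp [hA, hB']
  · have hA : (PySem.List.enumerate pages 0).any (pvCondA rules pages) = false := by
      rw [← Bool.not_eq_true, anyA_iff]; exact hb
    have hB : rulecheckAltGo rules pages PySem.Set.empty = none := (alt_none_iff_not_bad rules pages).mpr hb
    have hB' : rulecheckAltGo rules pages ([] : PySem.Set Int) = none := hB
    simp [hA, hB']
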